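-- pv_equiv track=rewrite | github.com/EdOoO21/codes-python | 25 задания/25 1.py | f
-- ===== SOURCE A (Python) =====
-- def f(n):
--     k = []
--     d = 2
--     while d * d < n:
--         if n % d == 0:
--             k.append(d)
--             k.append(n // d)
--         d += 1
--     if d ** 2 == n:
--         k.append(d)
--     k.sort()
--     return k
-- ===== SOURCE B (Python) =====
-- def f(n):
--     if n <= 1:
--         return []
--     m = n
--     fac = []
--     p = 2
--     while p * p <= m:
--         if m % p == 0:
--             e = 0
--             while m % p == 0:
--                 m //= p
--                 e += 1
--             fac.append((p, e))
--         p += 1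
--     if m > 1:
--         fac.append((m, 1))
--     divs = [1]
--     for p, e in fac:
--         divs = [d * p ** i for d in divs for i in range(e + 1)]
--     divs.sort()
--     return [d for d in divs if d != 1 and d != n]
-- ===== Notes on version B (the rewrite author's own statement) =====
-- stated objective: alternative
-- what changed: B computes the prime factorisation of n (dividing each prime factor out so the trial bound shrinks with the remaining cofactor), expands the factorisation combinatorially into all divisors, sorts them, and drops the two trivial divisors - instead of A's fixed sqrt(n) trial scan collecting divisor/cofactor pairs.
import Mathlib
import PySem

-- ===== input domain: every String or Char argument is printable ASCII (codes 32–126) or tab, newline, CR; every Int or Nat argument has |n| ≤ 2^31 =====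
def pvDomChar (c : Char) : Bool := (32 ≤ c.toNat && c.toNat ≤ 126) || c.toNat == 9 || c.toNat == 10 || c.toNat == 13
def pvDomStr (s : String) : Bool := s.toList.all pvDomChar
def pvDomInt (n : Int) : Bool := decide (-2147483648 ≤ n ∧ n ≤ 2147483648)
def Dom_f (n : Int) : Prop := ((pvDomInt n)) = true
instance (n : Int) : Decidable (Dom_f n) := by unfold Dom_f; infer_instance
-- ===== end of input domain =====

-- B finds the proper divisors by prime factorisation (divide each prime out, then expand
-- the factorisation into all divisors) instead of A's √n trial scan; return-value equivalence.

-- ===== PORT A =====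
-- small hand-built termination certificates (cited in decreasing_by; kept tiny on purpose)
theorem decA (n d : Int) (h : d * d ≤ n) : (n + 2 - (d + 1)).toNat < (n + 2 - d).toNat := by
  have h3 : 0 ≤ d * d - 2 * d + 1 := by
    calc (0:Int) ≤ (d - 1) * (d - 1) := mul_self_nonneg _
    _ = d * d - 2 * d + 1 := by ring
  have h0 : 0 ≤ d * d := mul_self_nonneg d
  refine (Int.toNat_lt_toNat ?_).mpr ?_ <;> linarith

theorem decStrip (m p : Int) (hp : 2 ≤ p) (hm : 1 ≤ m) :
    (PySem.Int.floordiv m p).toNat < m.toNat := by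
  rw [PySem.Int.floordiv_eq_ediv_of_pos (by linarith)]
  have h1 : m / p < m := Int.ediv_lt_of_lt_mul (by linarith)
    (by linarith [mul_pos (show (0:Int) < p - 1 by linarith) (show (0:Int) < m by linarith)])
  refine (Int.toNat_lt_toNat ?_).mpr h1
  linarith

theorem decB (m m' p : Int) (h : p * p ≤ m) (hle : m' ≤ m) :
    (m' + 2 - (p + 1)).toNat < (m + 2 - p).toNat := by
  have h3 : 0 ≤ p * p - 2 * p + 1 := by
    calc (0:Int) ≤ (p - 1) * (p - 1) := mul_self_nonneg _
    _ = p * p - 2 * p + 1 := by ring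
  have h0 : 0 ≤ p * p := mul_self_nonneg p
  refine (Int.toNat_lt_toNat ?_).mpr ?_ <;> linarith

def fA_loop (n d : Int) (k : List Int) : List Int :=
  if _h : d * d < n then
    fA_loop n (d + 1) (if PySem.Int.mod n d = 0 then k ++ [d, PySem.Int.floordiv n d] else k)
  else if d ^ 2 = n then k ++ [d] else k
termination_by (n + 2 - d).toNat
decreasing_by exact decA n d (le_of_lt _h)

def f (n : Int) : List Int := PySem.List.sorted (fA_loop n 2 []) (fun x => x) false

-- ===== PORT B =====
-- inner 'while m % p == 0: m //= p; e += 1'; the extra '2 ≤ p ∧ 1 ≤ m' in the guard is a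
-- totality guard only (it holds at every call the program makes)
def stripLoop (m p e : Int) : Int × Int :=
  if _h : PySem.Int.mod m p = 0 ∧ 2 ≤ p ∧ 1 ≤ m then
    stripLoop (PySem.Int.floordiv m p) p (e + 1)
  else (m, e)
termination_by m.toNat
decreasing_by exact decStrip m p _h.2.1 _h.2.2

-- the port's termination needs that the inner loop never increases m
theorem stripLoop_fst_le (m p e : Int) : (stripLoop m p e).1 ≤ m := by
  induction m, e using stripLoop.induct p with
  | case1 m e h ih =>
    rw [stripLoop, dif_pos h]
    have hp2 : 2 ≤ p := h.2.1
    refine le_trans ih ?_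
    rw [PySem.Int.floordiv_eq_ediv_of_pos (by omega : (0:Int) < p)]
    exact Int.ediv_le_self p (by omega)
  | case2 m e h =>
    rw [stripLoop, dif_neg h]

-- outer 'while p * p <= m', appending (p, e) per prime, then the trailing 'if m > 1' entry
def factLoop (m p : Int) : List (Int × Int) :=
  if _h : p * p ≤ m then
    if PySem.Int.mod m p = 0 then
      (p, (stripLoop m p 0).2) :: factLoop (stripLoop m p 0).1 (p + 1)
    else factLoop m (p + 1)
  else if 1 < m then [(m, 1)] else []
termination_by (m + 2 - p).toNat
decreasing_by
  · exact decB m (stripLoop m p 0).1 p _h (stripLoop_fst_le m p 0)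
  · exact decB m m p _h (le_refl m)

-- 'divs = [1]; for p, e in fac: divs = [d * p**i for d in divs for i in range(e+1)]';
-- i comes from range(e+1) so i ≥ 0 and 'p ** i' is exactly 'pe.1 ^ i.toNat'
def f_alt (n : Int) : List Int :=
  if n ≤ 1 then []
  else
    (PySem.List.sorted
        ((factLoop n 2).foldl
          (fun divs pe =>
            divs.flatMap (fun d =>
              (PySem.List.pyRange 0 (pe.2 + 1) 1).map (fun i => d * pe.1 ^ i.toNat)))
          [1])
        (fun x => x) false).filter (fun d => d != 1 && d != n)

-- ===== PRECONDITION & SPEC =====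
def Spec_f (n : Int) (out : List Int) : Prop := out = f_alt n
instance (n : Int) (out : List Int) : Decidable (Spec_f n out) := by unfold Spec_f; infer_instance

-- ===== CLAIM (what is proved, stated in full; the proofs are below) =====
def Claim_equal_f : Prop := ∀ (n : Int), Dom_f n → Spec_f n (f n)

-- ===== LEMMAS AND PROOFS =====

-- two strictly increasing integer lists with the same members are equal
theorem eq_of_pairwise_lt_of_mem_iff (l1 l2 : List Int)
    (h1 : l1.Pairwise (· < ·)) (h2 : l2.Pairwise (· < ·))
    (hm : ∀ x, x ∈ l1 ↔ x ∈ l2) : l1 = l2 := by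
  have hperm : l1.Perm l2 :=
    (List.perm_ext_iff_of_nodup (h1.imp ne_of_lt) (h2.imp ne_of_lt)).mpr hm
  exact hperm.eq_of_pairwise (fun a b _ _ hab hba => absurd hba (lt_asymm hab)) h1 h2

-- ---------- A side: f n is the ascending list of divisors d of n with 1 < d < n ----------

-- accumulator-free view of A's loop
def arest (n d : Int) : List Int :=
  if _h : d * d < n then
    if PySem.Int.mod n d = 0 then d :: PySem.Int.floordiv n d :: arest n (d + 1)
    else arest n (d + 1)
  else if d ^ 2 = n then [d] else []
termination_by (n + 2 - d).toNat
decreasing_by all_goals exact decA n d (by linarith)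

-- the small divisors (d*d ≤ n) and large cofactors produced by A, ascending/descending
def bsmall (n d : Int) : List Int :=
  if _h : d * d ≤ n then
    if PySem.Int.mod n d = 0 then d :: bsmall n (d + 1) else bsmall n (d + 1)
  else []
termination_by (n + 2 - d).toNat
decreasing_by all_goals exact decA n d (by linarith)

def blarge (n d : Int) : List Int :=
  if _h : d * d ≤ n then
    if PySem.Int.mod n d = 0 ∧ d * d ≠ n then PySem.Int.floordiv n d :: blarge n (d + 1)
    else blarge n (d + 1)
  else []
termination_by (n + 2 - d).toNat
decreasing_by all_goals exact decA n d (by linarith)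

theorem fd_mul (n d : Int) (hpos : 0 < d) (hm : PySem.Int.mod n d = 0) :
    PySem.Int.floordiv n d * d = n := by
  rw [PySem.Int.floordiv_eq_ediv_of_pos hpos]
  exact Int.ediv_mul_cancel ((PySem.Int.mod_eq_zero_iff_dvd n d).mp hm)

theorem fA_loop_eq (n d : Int) (k : List Int) : fA_loop n d k = k ++ arest n d := by
  induction d, k using fA_loop.induct n with
  | case1 d k h ih =>
    rw [fA_loop, arest, dif_pos h, dif_pos h]
    by_cases hm : PySem.Int.mod n d = 0
    · simp only [hm, if_true, dite_eq_ite] at ih ⊢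
      rw [ih]
      simp
    · simp only [hm, if_false, dite_eq_ite] at ih ⊢
      exact ih
  | case2 d k h hsq =>
    rw [fA_loop, arest, dif_neg h, dif_neg h, if_pos hsq, if_pos hsq]
  | case3 d k h hsq =>
    rw [fA_loop, arest, dif_neg h, dif_neg h, if_neg hsq, if_neg hsq]
    simp

theorem arest_perm (n d : Int) (hd : 2 ≤ d) :
    (arest n d).Perm (bsmall n d ++ blarge n d) := by
  induction d using arest.induct n with
  | case1 d h hm ih =>
    have hle : d * d ≤ n := le_of_lt h
    have hne : d * d ≠ n := ne_of_lt h
    rw [arest, bsmall, blarge, dif_pos h, dif_pos hle, dif_pos hle, if_pos hm, if_pos hm,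
      if_pos ⟨hm, hne⟩, List.cons_append]
    exact ((ih (by omega)).cons _).trans List.perm_middle.symm |>.cons d
  | case2 d h hm ih =>
    have hle : d * d ≤ n := le_of_lt h
    have hand : ¬ (PySem.Int.mod n d = 0 ∧ d * d ≠ n) := fun hc => hm hc.1
    rw [arest, bsmall, blarge, dif_pos h, dif_pos hle, dif_pos hle, if_neg hm, if_neg hm,
      if_neg hand]
    exact ih (by omega)
  | case3 d h hsq =>
    have hdd : d * d = n := by rw [← hsq]; ring
    have hm : PySem.Int.mod n d = 0 :=
      (PySem.Int.mod_eq_zero_iff_dvd n d).mpr ⟨d, hdd.symm⟩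
    have hstop : ¬ (d + 1) * (d + 1) ≤ n := by nlinarith
    have hand : ¬ (PySem.Int.mod n d = 0 ∧ d * d ≠ n) := fun hc => hc.2 hdd
    rw [arest, bsmall, blarge, dif_neg h, if_pos hsq, dif_pos (le_of_eq hdd), if_pos hm,
      dif_pos (le_of_eq hdd), if_neg hand, bsmall, blarge, dif_neg hstop, dif_neg hstop]
    simp
  | case4 d h hsq =>
    have hgt : ¬ d * d ≤ n := by
      intro hle
      exact hsq (by rw [sq]; omega)
    rw [arest, bsmall, blarge, dif_neg h, if_neg hsq, dif_neg hgt, dif_neg hgt]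
    simp

theorem mem_bsmall (n d : Int) (hd : 2 ≤ d) (x : Int) :
    x ∈ bsmall n d ↔ d ≤ x ∧ x * x ≤ n ∧ PySem.Int.mod n x = 0 := by
  induction d using bsmall.induct n with
  | case1 d h hm ih =>
    rw [bsmall, dif_pos h, if_pos hm, List.mem_cons, ih (by omega)]
    constructor
    · rintro (rfl | ⟨h1, h2, h3⟩)
      · exact ⟨le_refl _, h, hm⟩
      · exact ⟨by omega, h2, h3⟩
    · rintro ⟨h1, h2, h3⟩
      by_cases hx : x = d
      · exact Or.inl hx
      · exact Or.inr ⟨by omega, h2, h3⟩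
  | case2 d h hm ih =>
    rw [bsmall, dif_pos h, if_neg hm, ih (by omega)]
    constructor
    · rintro ⟨h1, h2, h3⟩; exact ⟨by omega, h2, h3⟩
    · rintro ⟨h1, h2, h3⟩
      refine ⟨?_, h2, h3⟩
      rcases eq_or_lt_of_le h1 with rfl | hlt
      · exact absurd h3 hm
      · omega
  | case3 d h =>
    rw [bsmall, dif_neg h]
    simp only [List.not_mem_nil, false_iff]
    rintro ⟨h1, h2, h3⟩
    have : d * d ≤ x * x := by nlinarith
    omega

theorem mem_blarge (n d : Int) (hd : 2 ≤ d) (y : Int) :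
    y ∈ blarge n d ↔ PySem.Int.mod n y = 0 ∧ 0 < y ∧ d * y ≤ n ∧ n < y * y := by
  induction d using blarge.induct n with
  | case1 d h hm ih =>
    obtain ⟨hm0, hne⟩ := hm
    have hq : PySem.Int.floordiv n d * d = n := fd_mul n d (by omega) hm0
    set q := PySem.Int.floordiv n d with hqdef
    have hlt : d * d < n := lt_of_le_of_ne h hne
    have hqpos : 0 < q := by nlinarith
    have hdq : d < q := by nlinarith
    rw [blarge, dif_pos h, if_pos ⟨hm0, hne⟩, List.mem_cons, ih (by omega)]
    constructor
    · rintro (rfl | ⟨h1, h2, h3, h4⟩)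
      · refine ⟨?_, hqpos, by nlinarith, by nlinarith⟩
        exact (PySem.Int.mod_eq_zero_iff_dvd n q).mpr ⟨d, by linarith [hq]⟩
      · exact ⟨h1, h2, by nlinarith, h4⟩
    · rintro ⟨h1, h2, h3, h4⟩
      by_cases hy : (d + 1) * y ≤ n
      · exact Or.inr ⟨h1, h2, hy, h4⟩
      · left
        obtain ⟨c, hc⟩ := (PySem.Int.mod_eq_zero_iff_dvd n y).mp h1
        have hcd : c = d := by nlinarith
        have : n = d * y := by rw [hc, hcd]; ring
        have : q * d = d * y := by rw [hq, this]
        nlinarith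
  | case2 d h hm ih =>
    rw [blarge, dif_pos h, if_neg hm, ih (by omega)]
    constructor
    · rintro ⟨h1, h2, h3, h4⟩; exact ⟨h1, h2, by nlinarith, h4⟩
    · rintro ⟨h1, h2, h3, h4⟩
      refine ⟨h1, h2, ?_, h4⟩
      by_contra hy
      obtain ⟨c, hc⟩ := (PySem.Int.mod_eq_zero_iff_dvd n y).mp h1
      have hcd : c = d := by nlinarith
      have hn : n = d * y := by rw [hc, hcd]; ring
      have hdy : d < y := by nlinarith
      have hmd : PySem.Int.mod n d = 0 :=
        (PySem.Int.mod_eq_zero_iff_dvd n d).mpr ⟨y, hn⟩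
      exact hm ⟨hmd, by nlinarith⟩
  | case3 d h =>
    rw [blarge, dif_neg h]
    simp only [List.not_mem_nil, false_iff]
    rintro ⟨h1, h2, h3, h4⟩
    have hdy : d < y := by nlinarith
    nlinarith

theorem bsmall_pairwise (n d : Int) (hd : 2 ≤ d) :
    (bsmall n d).Pairwise (· < ·) := by
  induction d using bsmall.induct n with
  | case1 d h hm ih =>
    rw [bsmall, dif_pos h, if_pos hm]
    refine List.pairwise_cons.mpr ⟨?_, ih (by omega)⟩
    intro x hx
    have := (mem_bsmall n (d + 1) (by omega) x).mp hx
    omega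
  | case2 d h hm ih =>
    rw [bsmall, dif_pos h, if_neg hm]
    exact ih (by omega)
  | case3 d h =>
    rw [bsmall, dif_neg h]
    exact List.Pairwise.nil

theorem blarge_pairwise (n d : Int) (hd : 2 ≤ d) :
    (blarge n d).Pairwise (fun a b => b < a) := by
  induction d using blarge.induct n with
  | case1 d h hm ih =>
    obtain ⟨hm0, hne⟩ := hm
    rw [blarge, dif_pos h, if_pos ⟨hm0, hne⟩]
    refine List.pairwise_cons.mpr ⟨?_, ih (by omega)⟩
    intro y hy
    have hq : PySem.Int.floordiv n d * d = n := fd_mul n d (by omega) hm0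
    obtain ⟨h1, h2, h3, h4⟩ := (mem_blarge n (d + 1) (by omega) y).mp hy
    nlinarith
  | case2 d h hm ih =>
    rw [blarge, dif_pos h, if_neg hm]
    exact ih (by omega)
  | case3 d h =>
    rw [blarge, dif_neg h]
    exact List.Pairwise.nil

theorem mem_small_large_iff (n x : Int) :
    x ∈ bsmall n 2 ++ blarge n 2 ↔ (2 ≤ x ∧ x < n) ∧ PySem.Int.mod n x = 0 := by
  rw [List.mem_append, mem_bsmall n 2 (le_refl 2), mem_blarge n 2 (le_refl 2)]
  constructor
  · rintro (⟨h1, h2, h3⟩ | ⟨h1, h2, h3, h4⟩)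
    · exact ⟨⟨h1, by nlinarith⟩, h3⟩
    · have hx2 : 2 ≤ x := by nlinarith
      exact ⟨⟨hx2, by nlinarith⟩, h1⟩
  · rintro ⟨⟨h1, h2⟩, h3⟩
    by_cases hs : x * x ≤ n
    · exact Or.inl ⟨h1, hs, h3⟩
    · right
      obtain ⟨c, hc⟩ := (PySem.Int.mod_eq_zero_iff_dvd n x).mp h3
      have hc2 : 2 ≤ c := by nlinarith
      exact ⟨h3, by omega, by nlinarith, by omega⟩

theorem f_eq_filter (n : Int) :
    f n = (PySem.List.pyRange 2 n 1).filter (fun d => PySem.Int.mod n d == 0) := by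
  unfold f
  rw [fA_loop_eq]
  simp only [List.nil_append]
  apply PySem.List.sorted_eq_of_perm_of_pairwise_lt
  · refine (((arest_perm n 2 (le_refl 2)).trans ?_).symm)
    have hnodup1 : (bsmall n 2 ++ blarge n 2).Nodup := by
      rw [List.nodup_append]
      refine ⟨(bsmall_pairwise n 2 (le_refl 2)).imp ne_of_lt,
        ((blarge_pairwise n 2 (le_refl 2)).imp (fun h => (ne_of_lt h).symm)), ?_⟩
      intro x hx y hy
      obtain ⟨_, h2, _⟩ := (mem_bsmall n 2 (le_refl 2) x).mp hx
      obtain ⟨_, _, _, h4⟩ := (mem_blarge n 2 (le_refl 2) y).mp hy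
      intro hxy
      rw [hxy] at h2
      omega
    have hnodup2 : ((PySem.List.pyRange 2 n 1).filter
        (fun d => PySem.Int.mod n d == 0)).Nodup :=
      (PySem.List.nodup_pyRange_one 2 n).filter _
    refine (List.perm_ext_iff_of_nodup hnodup1 hnodup2).mpr ?_
    intro a
    rw [mem_small_large_iff, List.mem_filter, PySem.List.mem_pyRange_one]
    simp
  · exact (PySem.List.pairwise_lt_pyRange_one 2 n).filter _

-- ---------- B side: the factorisation is good and expands to exactly the divisors ----------

-- what the factor loop guarantees: a list of (prime, exponent ≥ 1) whose product is m,
-- each prime not dividing the remaining product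
def GoodFac : List (Int × Int) → Int → Prop
  | [], m => m = 1
  | pe :: rest, m => ∃ m', 2 ≤ pe.1 ∧ Prime pe.1 ∧ 1 ≤ pe.2 ∧ ¬ pe.1 ∣ m' ∧ 1 ≤ m' ∧
      GoodFac rest m' ∧ m = pe.1 ^ pe.2.toNat * m'

theorem stripLoop_spec (m p e : Int) (hp : 2 ≤ p) : 1 ≤ m →
    ∃ j : Nat, (stripLoop m p e).2 = e + j ∧ m = p ^ j * (stripLoop m p e).1 ∧
      ¬ p ∣ (stripLoop m p e).1 ∧ 1 ≤ (stripLoop m p e).1 := by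
  induction m, e using stripLoop.induct p with
  | case1 m e h ih =>
    intro hm
    obtain ⟨h1, h2, h3⟩ := h
    have hdvd : p ∣ m := (PySem.Int.mod_eq_zero_iff_dvd m p).mp h1
    have hfd : PySem.Int.floordiv m p = m / p := PySem.Int.floordiv_eq_ediv_of_pos (by omega)
    have hmul : p * (m / p) = m := Int.mul_ediv_cancel' hdvd
    have hple : p ≤ m := Int.le_of_dvd (by omega) hdvd
    have hq1 : 1 ≤ m / p := by
      rcases Int.lt_or_le (m / p) 1 with hlt | hle
      · nlinarith
      · exact hle
    rw [stripLoop, dif_pos ⟨h1, h2, h3⟩]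
    obtain ⟨j, hj1, hj2, hj3, hj4⟩ := ih (by rw [hfd]; exact hq1)
    refine ⟨j + 1, by rw [hj1]; push_cast; ring, ?_, hj3, hj4⟩
    rw [pow_succ]
    calc m = p * PySem.Int.floordiv m p := by rw [hfd, hmul]
    _ = p * (p ^ j * (stripLoop (PySem.Int.floordiv m p) p (e + 1)).1) := by rw [← hj2]
    _ = p ^ j * p * (stripLoop (PySem.Int.floordiv m p) p (e + 1)).1 := by ring
  | case2 m e h =>
    intro hm
    rw [stripLoop, dif_neg h]
    have hnm : PySem.Int.mod m p ≠ 0 := by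
      intro hc
      exact h ⟨hc, hp, hm⟩
    refine ⟨0, by omega, by simp, ?_, hm⟩
    intro hdvd
    exact hnm ((PySem.Int.mod_eq_zero_iff_dvd m p).mpr hdvd)

-- an integer ≥ 2 with no divisor in [2, p) is prime
theorem prime_of_no_small_dvd (p : Int) (hp : 2 ≤ p)
    (hnd : ∀ q : Int, 2 ≤ q → q < p → ¬ q ∣ p) : Prime p := by
  rw [Int.prime_iff_natAbs_prime]
  rw [Nat.prime_def_lt]
  refine ⟨by omega, fun r hr hdvd => ?_⟩
  by_contra h1
  have hr0 : r ≠ 0 := by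
    rintro rfl
    rw [Nat.zero_dvd] at hdvd
    omega
  have h2r : 2 ≤ r := by omega
  have : (r : Int) ∣ p := by
    have := Int.ofNat_dvd.mpr hdvd
    rwa [Int.natAbs_of_nonneg (by omega)] at this
  exact hnd r (by exact_mod_cast h2r) (by omega) this

theorem factLoop_good (m p : Int) : 2 ≤ p → 1 ≤ m →
    (∀ q : Int, 2 ≤ q → q < p → ¬ q ∣ m) → GoodFac (factLoop m p) m := by
  induction m, p using factLoop.induct with
  | case1 m p h hmod ih =>
    intro hp hm hnd
    obtain ⟨j, hj1, hj2, hj3, hj4⟩ := stripLoop_spec m p 0 hp hm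
    have hdvd : p ∣ m := (PySem.Int.mod_eq_zero_iff_dvd m p).mp hmod
    have hj0 : j ≠ 0 := by
      rintro rfl
      simp only [pow_zero, one_mul] at hj2
      rw [hj2] at hdvd
      exact hj3 hdvd
    have hprime : Prime p := by
      refine prime_of_no_small_dvd p hp (fun q hq1 hq2 hqd => ?_)
      exact hnd q hq1 hq2 (hqd.trans hdvd)
    rw [factLoop, dif_pos h, if_pos hmod]
    refine ⟨(stripLoop m p 0).1, hp, hprime, ?_, hj3, hj4, ?_, ?_⟩
    · rw [hj1]; omega
    · refine ih (by omega) hj4 (fun q hq1 hq2 hqd => ?_)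
      rcases Int.lt_or_le q p with hlt | hle
      · exact hnd q hq1 hlt (hqd.trans ⟨p ^ j, by linear_combination hj2⟩)
      · have : q = p := by omega
        subst this
        exact hj3 hqd
    · show m = p ^ ((stripLoop m p 0).2).toNat * (stripLoop m p 0).1
      rw [hj1]
      have : ((0:Int) + (j:Int)).toNat = j := by omega
      rw [this]
      exact hj2
  | case2 m p h hmod ih =>
    intro hp hm hnd
    rw [factLoop, dif_pos h, if_neg hmod]
    refine ih (by omega) hm (fun q hq1 hq2 hqd => ?_)
    rcases Int.lt_or_le q p with hlt | hle
    · exact hnd q hq1 hlt hqd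
    · have : q = p := by omega
      subst this
      exact hmod ((PySem.Int.mod_eq_zero_iff_dvd m q).mpr hqd)
  | case3 m p h h1 =>
    intro hp hm hnd
    have hm2 : 2 ≤ m := by omega
    have hmprime : Prime m := by
      refine prime_of_no_small_dvd m hm2 (fun q hq1 hq2 hqd => ?_)
      obtain ⟨c, hc⟩ := hqd
      have hc1 : 1 ≤ c := by nlinarith
      have hc2 : 2 ≤ c := by
        rcases eq_or_lt_of_le hc1 with rfl | hlt
        · omega
        · omega
      rcases Int.le_total q c with hqc | hcq
      · have hqp : q < p := by nlinarith
        exact hnd q hq1 hqp ⟨c, hc⟩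
      · have hcp : c < p := by nlinarith
        exact hnd c hc2 hcp ⟨q, by rw [hc]; ring⟩
    rw [factLoop, dif_neg h, if_pos h1]
    exact ⟨1, hm2, hmprime, by norm_num,
      fun hd => absurd (Int.le_of_dvd one_pos hd) (by omega),
      by norm_num, rfl, by norm_num⟩
  | case4 m p h h1 =>
    intro hp hm hnd
    rw [factLoop, dif_neg h, if_neg h1]
    show m = 1
    omega

-- divisor decomposition along one prime power
theorem dvd_decomp (p m' : Int) (hp2 : 2 ≤ p) (hprime : Prime p) (hnd : ¬ p ∣ m') :
    ∀ (e : Nat) (t : Int), 0 < t → t ∣ p ^ e * m' →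
      ∃ i ≤ e, ∃ t', 0 < t' ∧ t' ∣ m' ∧ t = p ^ i * t' := by
  intro e
  induction e with
  | zero =>
    intro t ht hdvd
    simp only [pow_zero, one_mul] at hdvd
    exact ⟨0, le_refl 0, t, ht, hdvd, by simp⟩
  | succ e ih =>
    intro t ht hdvd
    by_cases hpt : p ∣ t
    · obtain ⟨u, hu⟩ := hpt
      have hu0 : 0 < u := by nlinarith
      have hud : u ∣ p ^ e * m' := by
        have : p * u ∣ p * (p ^ e * m') := by
          rw [← hu]
          calc t ∣ p ^ (e + 1) * m' := hdvd
          _ = p * (p ^ e * m') := by ring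
        exact Int.dvd_of_mul_dvd_mul_left (by omega) this
      obtain ⟨i, hi, t', ht', ht'd, heq⟩ := ih u hu0 hud
      exact ⟨i + 1, by omega, t', ht', ht'd, by rw [hu, heq]; ring⟩
    · have hcop : IsCoprime t p := ((hprime.coprime_iff_not_dvd).mpr hpt).symm
      have : t ∣ m' := (hcop.pow_right).dvd_of_dvd_mul_left hdvd
      exact ⟨0, by omega, t, ht, this, by simp⟩

-- uniqueness of that decomposition
theorem decomp_unique (p : Int) (hp2 : 2 ≤ p) (i j : Nat) (t t' : Int)
    (ht : ¬ p ∣ t) (ht' : ¬ p ∣ t') (hne : t ≠ 0)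
    (h : p ^ i * t = p ^ j * t') : i = j ∧ t = t' := by
  have hp0 : p ≠ 0 := by omega
  rcases lt_trichotomy i j with hlt | heq | hgt
  · exfalso
    have hj : j = i + (j - i) := by omega
    rw [hj, pow_add] at h
    have : t = p ^ (j - i) * t' := by
      apply mul_left_cancel₀ (pow_ne_zero i hp0)
      rw [h]; ring
    apply ht
    rw [this]
    exact Dvd.dvd.mul_right (dvd_pow_self p (by omega)) t'
  · subst heq
    exact ⟨rfl, mul_left_cancel₀ (pow_ne_zero i hp0) h⟩
  · exfalso
    have hi : i = j + (i - j) := by omega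
    rw [hi, pow_add] at h
    have : p ^ (i - j) * t = t' := by
      apply mul_left_cancel₀ (pow_ne_zero j hp0)
      rw [← h]; ring
    apply ht'
    rw [← this]
    exact Dvd.dvd.mul_right (dvd_pow_self p (by omega)) t

-- the divisor-expansion fold: nodup and exactly the products {d * t : t ∣ m}
theorem gen_spec :
    ∀ (fac : List (Int × Int)) (m : Int), GoodFac fac m →
    ∀ (divs : List Int), divs.Nodup → (∀ d ∈ divs, 0 < d ∧ IsCoprime d m) →
    (fac.foldl
        (fun divs pe =>
          divs.flatMap (fun d =>
            (PySem.List.pyRange 0 (pe.2 + 1) 1).map (fun i => d * pe.1 ^ i.toNat)))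
        divs).Nodup ∧
    (∀ x, x ∈ fac.foldl
        (fun divs pe =>
          divs.flatMap (fun d =>
            (PySem.List.pyRange 0 (pe.2 + 1) 1).map (fun i => d * pe.1 ^ i.toNat)))
        divs ↔ ∃ d ∈ divs, ∃ t, 0 < t ∧ t ∣ m ∧ x = d * t) := by
  intro fac
  induction fac with
  | nil =>
    intro m hg divs hnd hpos
    have hm1 : m = 1 := hg
    subst hm1
    refine ⟨hnd, fun x => ?_⟩
    simp only [List.foldl_nil]
    constructor
    · intro hx
      exact ⟨x, hx, 1, one_pos, dvd_refl 1, by ring⟩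
    · rintro ⟨d, hd, t, ht, htd, rfl⟩
      have ht1 : t = 1 := by
        rcases Int.isUnit_iff.mp (isUnit_of_dvd_one htd) with rfl | rfl
        · rfl
        · omega
      simpa [ht1] using hd
  | cons pe rest ih =>
    intro m hg divs hnd hpos
    obtain ⟨m', hp2, hprime, he1, hndvd, hm'1, hrest, hmeq⟩ := hg
    have hE0 : (0:Int) ≤ pe.2 := by omega
    -- every d in divs is positive, coprime to m', and not divisible by pe.1
    have hdfacts : ∀ d ∈ divs, 0 < d ∧ IsCoprime d m' ∧ ¬ pe.1 ∣ d := by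
      intro d hd
      obtain ⟨hdpos, hdcop⟩ := hpos d hd
      rw [hmeq] at hdcop
      refine ⟨hdpos, hdcop.of_mul_right_right, fun hpd => ?_⟩
      have hpm : pe.1 ∣ pe.1 ^ pe.2.toNat * m' := by
        refine Dvd.dvd.mul_right (dvd_pow_self pe.1 ?_) m'
        omega
      have := hdcop.isUnit_of_dvd' hpd hpm
      exact hprime.not_unit this
    -- the expanded accumulator
    have hstep : ∀ x, x ∈ divs.flatMap (fun d =>
        (PySem.List.pyRange 0 (pe.2 + 1) 1).map (fun i => d * pe.1 ^ i.toNat)) ↔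
        ∃ d ∈ divs, ∃ i : Nat, i ≤ pe.2.toNat ∧ x = d * pe.1 ^ i := by
      intro x
      simp only [List.mem_flatMap, List.mem_map, PySem.List.mem_pyRange_one]
      constructor
      · rintro ⟨d, hd, i, ⟨hi0, hi1⟩, rfl⟩
        exact ⟨d, hd, i.toNat, by omega, rfl⟩
      · rintro ⟨d, hd, i, hi, rfl⟩
        exact ⟨d, hd, (i : Int), ⟨by omega, by omega⟩, by simp⟩
    have hnodup' : (divs.flatMap (fun d =>
        (PySem.List.pyRange 0 (pe.2 + 1) 1).map (fun i => d * pe.1 ^ i.toNat))).Nodup := by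
      rw [List.nodup_flatMap]
      constructor
      · intro d hd
        obtain ⟨hdpos, _, _⟩ := hdfacts d hd
        refine List.Nodup.map_on ?_ (PySem.List.nodup_pyRange_one 0 (pe.2 + 1))
        intro i hi j hj hij
        have hpows : pe.1 ^ i.toNat = pe.1 ^ j.toNat :=
          mul_left_cancel₀ (by omega : d ≠ 0) hij
        have htn : i.toNat = j.toNat := by
          by_contra hne
          rcases Nat.lt_or_ge i.toNat j.toNat with hlt | hge
          · have := pow_lt_pow_right₀ (by omega : (1:Int) < pe.1) hlt
            omega
          · have hlt : j.toNat < i.toNat := by omega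
            have := pow_lt_pow_right₀ (by omega : (1:Int) < pe.1) hlt
            omega
        obtain ⟨hi0, _⟩ := (PySem.List.mem_pyRange_one).mp hi
        obtain ⟨hj0, _⟩ := (PySem.List.mem_pyRange_one).mp hj
        omega
      · refine List.Pairwise.imp_of_mem ?_ hnd
        intro d1 d2 hd1 hd2 hne12
        obtain ⟨h1pos, _, h1nd⟩ := hdfacts d1 hd1
        obtain ⟨h2pos, _, h2nd⟩ := hdfacts d2 hd2
        intro x hx1 hx2
        simp only [List.mem_map, PySem.List.mem_pyRange_one] at hx1 hx2
        obtain ⟨i, _, hxi⟩ := hx1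
        obtain ⟨j, _, hxj⟩ := hx2
        have heq : pe.1 ^ i.toNat * d1 = pe.1 ^ j.toNat * d2 := by
          rw [mul_comm _ d1, mul_comm _ d2, hxi, hxj]
        exact hne12 (decomp_unique pe.1 hp2 i.toNat j.toNat d1 d2 h1nd h2nd
          (by omega) heq).2
    have hstep2 : ∀ d' ∈ divs.flatMap (fun d =>
        (PySem.List.pyRange 0 (pe.2 + 1) 1).map (fun i => d * pe.1 ^ i.toNat)),
        0 < d' ∧ IsCoprime d' m' := by
      intro d' hd'
      rw [hstep] at hd'
      obtain ⟨d, hd, i, hi, rfl⟩ := hd'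
      obtain ⟨hdpos, hdcop, _⟩ := hdfacts d hd
      refine ⟨mul_pos hdpos (pow_pos (by omega) i), ?_⟩
      exact hdcop.mul_left (((hprime.coprime_iff_not_dvd).mpr hndvd).pow_left)
    obtain ⟨ihnodup, ihmem⟩ := ih m' hrest _ hnodup' hstep2
    simp only [List.foldl_cons]
    refine ⟨ihnodup, fun x => ?_⟩
    rw [ihmem x]
    constructor
    · rintro ⟨d', hd', t', ht', ht'd, rfl⟩
      rw [hstep] at hd'
      obtain ⟨d, hd, i, hi, rfl⟩ := hd'
      refine ⟨d, hd, pe.1 ^ i * t', mul_pos (pow_pos (by omega) i) ht', ?_, by ring⟩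
      rw [hmeq]
      exact mul_dvd_mul (pow_dvd_pow pe.1 hi) ht'd
    · rintro ⟨d, hd, t, ht, htd, rfl⟩
      rw [hmeq] at htd
      obtain ⟨i, hi, t', ht', ht'd, heq⟩ :=
        dvd_decomp pe.1 m' hp2 hprime hndvd pe.2.toNat t ht htd
      refine ⟨d * pe.1 ^ i, ?_, t', ht', ht'd, by rw [heq]; ring⟩
      rw [hstep]
      exact ⟨d, hd, i, hi, rfl⟩

-- ---------- assembly ----------

theorem falt_eq (n : Int) (hn : 2 ≤ n) :
    f_alt n = (PySem.List.pyRange 2 n 1).filter (fun d => PySem.Int.mod n d == 0) := by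
  unfold f_alt
  rw [if_neg (by omega : ¬ n ≤ 1)]
  obtain ⟨hnodup, hmem⟩ := gen_spec (factLoop n 2) n
    (factLoop_good n 2 (le_refl 2) (by omega) (fun q h1 h2 _ => absurd h2 (by omega)))
    [1] (List.nodup_singleton 1)
    (by intro d hd
        simp only [List.mem_singleton] at hd
        subst hd
        exact ⟨one_pos, isCoprime_one_left⟩)
  have hmem' : ∀ x, x ∈ (factLoop n 2).foldl
      (fun divs pe =>
        divs.flatMap (fun d =>
          (PySem.List.pyRange 0 (pe.2 + 1) 1).map (fun i => d * pe.1 ^ i.toNat)))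
      [1] ↔ 0 < x ∧ x ∣ n := by
    intro x
    rw [hmem x]
    constructor
    · rintro ⟨d, hd, t, ht, htd, rfl⟩
      simp only [List.mem_singleton] at hd
      subst hd
      simpa using ⟨ht, htd⟩
    · rintro ⟨hx, hxd⟩
      exact ⟨1, List.mem_singleton_self 1, x, hx, hxd, (one_mul x).symm⟩
  have hsorted : PySem.List.sorted ((factLoop n 2).foldl
      (fun divs pe =>
        divs.flatMap (fun d =>
          (PySem.List.pyRange 0 (pe.2 + 1) 1).map (fun i => d * pe.1 ^ i.toNat)))
      [1]) (fun x => x) false =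
      (PySem.List.pyRange 1 (n + 1) 1).filter (fun d => PySem.Int.mod n d == 0) := by
    apply PySem.List.sorted_eq_of_perm_of_pairwise_lt
    · refine (List.perm_ext_iff_of_nodup
        ((PySem.List.nodup_pyRange_one 1 (n + 1)).filter _) hnodup).mpr ?_
      intro x
      rw [hmem' x, List.mem_filter, PySem.List.mem_pyRange_one]
      simp only [beq_iff_eq]
      constructor
      · rintro ⟨⟨h1, h2⟩, h3⟩
        exact ⟨by omega, (PySem.Int.mod_eq_zero_iff_dvd n x).mp h3⟩
      · rintro ⟨h1, h2⟩
        have := Int.le_of_dvd (by omega) h2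
        exact ⟨⟨by omega, by omega⟩, (PySem.Int.mod_eq_zero_iff_dvd n x).mpr h2⟩
    · exact (PySem.List.pairwise_lt_pyRange_one 1 (n + 1)).filter _
  rw [hsorted]
  apply eq_of_pairwise_lt_of_mem_iff
  · exact ((PySem.List.pairwise_lt_pyRange_one 1 (n + 1)).filter _).filter _
  · exact (PySem.List.pairwise_lt_pyRange_one 2 n).filter _
  · intro x
    simp only [List.mem_filter, PySem.List.mem_pyRange_one, beq_iff_eq, Bool.and_eq_true,
      bne_iff_ne, ne_eq]
    constructor
    · rintro ⟨⟨⟨h1, h2⟩, h3⟩, h4, h5⟩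
      exact ⟨⟨by omega, by omega⟩, h3⟩
    · rintro ⟨⟨h1, h2⟩, h3⟩
      exact ⟨⟨⟨by omega, by omega⟩, h3⟩, by omega, by omega⟩

-- ===== VERDICT (by name: the statement is the Claim_ definition above) =====
theorem f_spec : Claim_equal_f := by
  intro n _
  unfold Spec_f
  rw [f_eq_filter]
  by_cases hn : n ≤ 1
  · unfold f_alt
    rw [if_pos hn, PySem.List.pyRange_one_eq_nil (by omega : n ≤ 2)]
    rfl
  · rw [falt_eq n (by omega)]
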